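-- pv_equiv track=rewrite | github.com/mdiazv/codejam | 2021/1c/b/b.py | next_roaring
-- ===== SOURCE A (Python) =====
-- def roaring(y):
--     def ok(l, r):
--         if r == "":
--             return True
--         n = str(int(l)+1)
--         if not r.startswith(n):
--             return False
--         return ok(n, r[len(n):])
--
--     y = str(y)
--     return any(ok(y[:k], y[k:]) for k in range(1, len(y)))
--
-- def build(pfx, k):
--     s = str(pfx)
--     for _ in range(1, k):
--         s += str(pfx+1)
--         pfx += 1
--     return int(s)
--
-- def next_roaring(Y):
--     if Y < 10:
--         return 12
--
--     def search(a, b, n):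
--         if a+1 == b:
--             return build(a, n), build(b, n)
--         h = (a+b)//2
--         ph = build(h, n)
--         if ph > Y:
--             return search(a, h, n)
--         return search(h, b, n)
--
--     best = Y * 10 ** 10
--     for n in range(20):
--         for k in search(1, 10 ** 10, n):
--             if roaring(k) and k > Y and k < best:
--                 best = k
--
--     return best
-- ===== SOURCE B (Python) =====
-- def next_roaring(Y):
--     if Y < 10:
--         return 12
--
--     def build(pfx, k):
--         return int("".join(str(pfx + i) for i in range(max(k, 1))))
--
--     def is_roaring(y):
--         s = str(y)
--         for k in range(1, len(s)):
--             t, u = s[:k], s[:k]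
--             while len(t) < len(s):
--                 u = str(int(u) + 1)
--                 t += u
--             if t == s:
--                 return True
--         return False
--
--     cands = []
--     for n in range(20):
--         lo, hi = 1, 10 ** 10
--         while lo + 1 < hi:
--             mid = (lo + hi) // 2
--             if build(mid, n) > Y:
--                 hi = mid
--             else:
--                 lo = mid
--         cands += [build(lo, n), build(hi, n)]
--
--     return min([Y * 10 ** 10] + [k for k in cands if k > Y and is_roaring(k)])
-- ===== Notes on version B (the rewrite author's own statement) =====
-- stated objective: alternative
-- what changed: B restages the whole computation: it first collects every binary-search candidate (two per piece count) into a list (iterative lo/hi loop instead of A's recursive two-candidate search), then filters them with a rebuild-and-compare roaring test (regenerate the concatenation from each split prefix and compare it to the whole string, instead of A's recursive prefix-consuming verifier), and finally takes min over the sentinel plus the surviving candidates, replacing A's running-best fold; build becomes int of a join over a generator instead of a string-accumulating loop.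
import Mathlib
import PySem

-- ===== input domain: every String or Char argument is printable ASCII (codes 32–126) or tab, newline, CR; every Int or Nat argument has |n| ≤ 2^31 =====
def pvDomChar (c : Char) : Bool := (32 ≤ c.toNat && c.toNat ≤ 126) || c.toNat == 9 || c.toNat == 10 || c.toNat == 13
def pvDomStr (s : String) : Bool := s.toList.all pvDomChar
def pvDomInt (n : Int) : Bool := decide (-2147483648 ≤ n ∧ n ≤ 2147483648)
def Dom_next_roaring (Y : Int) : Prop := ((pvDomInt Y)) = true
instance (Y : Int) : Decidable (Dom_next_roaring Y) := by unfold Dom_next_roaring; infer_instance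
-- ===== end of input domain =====

-- B is a restaged alternative of A, not a speed-up: it collects all binary-search candidates into a
-- list first (iterative lo/hi loop), filters them with a rebuild-and-compare roaring test, and takes
-- min of the sentinel plus the survivors, instead of A's recursive search / recursive verifier /
-- running-best fold.

-- ===== PORT A =====
-- build(pfx, k): s = str(pfx); for _ in range(1, k): s += str(pfx+1); pfx += 1; return int(s)
def buildA (pfx : Int) (k : Int) : Int :=
  let sp := (PySem.List.pyRange 1 k 1).foldl
    (fun (sp : List Char × Int) _ => (sp.1 ++ PySem.Int.toChars (sp.2 + 1), sp.2 + 1))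
    (PySem.Int.toChars pfx, pfx)
  (PySem.Int.ofChars? sp.1).getD 0  -- int(s): exact, s is always a nonempty decimal literal here

-- ok(l, r) of roaring(); the fuel only makes the recursion structural (each call consumes
-- ≥ 1 character of r, since str() is never empty, so fuel = |r| never runs out)
def okA (fuel : Nat) (l r : List Char) : Bool :=
  if r = [] then true
  else match fuel with
    | 0 => false
    | fuel + 1 =>
      let n := PySem.Int.toChars ((PySem.Int.ofChars? l).getD 0 + 1)  -- str(int(l)+1); int() exact: l is a decimal literal
      if ¬ (PySem.Chars.startswith r n = true) then false
      else okA fuel n (PySem.List.slice r (some (n.length : Int)) none)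

-- roaring(y): any(ok(y[:k], y[k:]) for k in range(1, len(y)))
def roaringA (y : Int) : Bool :=
  let s := PySem.Int.toChars y
  (PySem.List.pyRange 1 (s.length : Int) 1).foldl
    (fun acc k => acc || okA s.length (PySem.List.slice s none (some k)) (PySem.List.slice s (some k) none))
    false

-- search(a, b, n); fuel 64 only makes the recursion structural (the interval halves each
-- step and next_roaring starts it at width 10^10 - 1 < 2^34, so fuel never runs out)
def searchA (Y n : Int) (fuel : Nat) (a b : Int) : Int × Int :=
  match fuel with
  | 0 => (buildA a n, buildA b n)
  | fuel + 1 =>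
    if a + 1 = b then (buildA a n, buildA b n)
    else
      let h := PySem.Int.floordiv (a + b) 2
      let ph := buildA h n
      if ph > Y then searchA Y n fuel a h
      else searchA Y n fuel h b

def next_roaring (Y : Int) : Int :=
  if Y < 10 then 12
  else
    (PySem.List.pyRange 0 20 1).foldl
      (fun best n =>
        let p := searchA Y n 64 1 (10 ^ 10)
        [p.1, p.2].foldl
          (fun best k => if roaringA k && decide (k > Y) && decide (k < best) then k else best)
          best)
      (Y * 10 ^ 10)

-- ===== PORT B =====
-- build(pfx, k) = int("".join(str(pfx + i) for i in range(max(k, 1))))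
def buildB (pfx : Int) (k : Int) : Int :=
  (PySem.Int.ofChars?
    (((PySem.List.pyRange 0 (max k 1) 1).map (fun i => PySem.Int.toChars (pfx + i))).flatten)).getD 0
  -- "".join of the generated decimal pieces is their concatenation; int() exact (nonempty decimal literal)

-- the rebuild loop of is_roaring: while len(t) < len(s): u = str(int(u)+1); t += u; then t == s
-- (fuel = |s| makes it structural; each pass appends at least one character to t)
def rebB (fuel : Nat) (t u total : List Char) : Bool :=
  if t.length < total.length then
    match fuel with
    | 0 => false
    | fuel + 1 =>
      let u' := PySem.Int.toChars ((PySem.Int.ofChars? u).getD 0 + 1)  -- str(int(u)+1); int() exact: u is a decimal literal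
      rebB fuel (t ++ u') u' total
  else t == total

-- is_roaring(y): the for-loop with an early return True is List.any
def roaringB (y : Int) : Bool :=
  let s := PySem.Int.toChars y
  (PySem.List.pyRange 1 (s.length : Int) 1).any
    (fun k => rebB s.length (PySem.List.slice s none (some k)) (PySem.List.slice s none (some k)) s)

-- the while lo + 1 < hi loop (fuel 64 makes it structural; width 10^10 - 1 < 2^34 halves each step)
def loopB (Y n : Int) (fuel : Nat) (lo hi : Int) : Int × Int :=
  match fuel with
  | 0 => (lo, hi)
  | fuel + 1 =>
    if lo + 1 < hi then
      let mid := PySem.Int.floordiv (lo + hi) 2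
      if buildB mid n > Y then loopB Y n fuel lo mid else loopB Y n fuel mid hi
    else (lo, hi)

def next_roaring_alt (Y : Int) : Int :=
  if Y < 10 then 12
  else
    let cands := (PySem.List.pyRange 0 20 1).foldl
      (fun acc n =>
        let p := loopB Y n 64 1 (10 ^ 10)
        acc ++ [buildB p.1 n, buildB p.2 n])
      []
    (PySem.List.min?
      ((Y * 10 ^ 10) :: cands.filter (fun k => decide (k > Y) && roaringB k))
      (fun x => x)).getD 0  -- min of a nonempty list: exact

-- ===== PRECONDITION & SPEC =====
def Spec_next_roaring (Y : Int) (out : Int) : Prop := out = next_roaring_alt Y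
instance (Y : Int) (out : Int) : Decidable (Spec_next_roaring Y out) := by unfold Spec_next_roaring; infer_instance

-- ===== CLAIM (what is proved, stated in full; the proofs are below) =====
def Claim_equal_next_roaring : Prop := ∀ (Y : Int), Dom_next_roaring Y → Spec_next_roaring Y (next_roaring Y)

-- ===== LEMMAS AND PROOFS =====

-- A's string-accumulating build loop equals the concatenation of the mapped pieces
lemma build_fold_eq (pfx : Int) (m : Nat) :
    (PySem.List.pyRange 1 (1 + (m : Int)) 1).foldl
      (fun (sp : List Char × Int) _ => (sp.1 ++ PySem.Int.toChars (sp.2 + 1), sp.2 + 1))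
      (PySem.Int.toChars pfx, pfx)
    = (((PySem.List.pyRange 0 (1 + (m : Int)) 1).map (fun i => PySem.Int.toChars (pfx + i))).flatten,
       pfx + m) := by
  induction m with
  | zero =>
    rw [show ((1 : Int) + (0 : Nat)) = 1 by norm_num]
    rw [PySem.List.pyRange_one_eq_nil (by norm_num), PySem.List.pyRange_one_cons (by norm_num),
        PySem.List.pyRange_one_eq_nil (by norm_num)]
    simp
  | succ m ih =>
    rw [show ((1 : Int) + ((m + 1 : Nat) : Int)) = (1 + (m : Int)) + 1 by push_cast; ring]
    rw [PySem.List.pyRange_one_succ_right (by omega),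
        PySem.List.pyRange_one_succ_right (by omega)]
    rw [List.foldl_append, ih]
    simp [List.foldl]
    constructor
    · ring_nf
    · omega

lemma buildA_eq_buildB (pfx k : Int) : buildA pfx k = buildB pfx k := by
  unfold buildA buildB
  by_cases hk : k ≤ 1
  · rw [PySem.List.pyRange_one_eq_nil hk, show max k 1 = 1 from max_eq_right hk,
        PySem.List.pyRange_one_cons (by norm_num), PySem.List.pyRange_one_eq_nil (by norm_num)]
    simp
  · have hmax : max k 1 = k := max_eq_left (by omega)
    have hk1 : k = 1 + ((k - 1).toNat : Int) := by omega
    rw [hmax, hk1, build_fold_eq]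

-- once t has left the prefixes of total, the rebuild loop can only answer false
lemma rebB_of_not_prefix (fuel : Nat) : ∀ t u total : List Char,
    ¬ (t <+: total) → rebB fuel t u total = false := by
  induction fuel with
  | zero =>
    intro t u total h
    unfold rebB
    split
    · rfl
    · simp only [beq_eq_false_iff_ne, ne_eq]
      rintro rfl; exact h List.prefix_rfl
  | succ fuel ih =>
    intro t u total h
    unfold rebB
    split
    · exact ih _ _ _ (fun hp => h ((List.prefix_append t _).trans hp))
    · simp only [beq_eq_false_iff_ne, ne_eq]
      rintro rfl; exact h List.prefix_rfl

-- A's prefix-consuming verifier agrees with B's rebuild-and-compare loop (synced fuel)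
lemma rebB_eq_okA (fuel : Nat) : ∀ u t r : List Char,
    rebB fuel t u (t ++ r) = okA fuel u r := by
  induction fuel with
  | zero =>
    intro u t r
    cases r with
    | nil => simp [rebB, okA]
    | cons c cs => simp [rebB, okA]
  | succ fuel ih =>
    intro u t r
    cases r with
    | nil => simp [rebB, okA]
    | cons c cs =>
      rw [rebB, okA]
      have hlt : t.length < (t ++ c :: cs).length := by simp
      rw [if_pos hlt, if_neg (List.cons_ne_nil c cs)]
      by_cases h : PySem.Chars.startswith (c :: cs)
          (PySem.Int.toChars ((PySem.Int.ofChars? u).getD 0 + 1)) = true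
      · obtain ⟨r', hr⟩ := (PySem.Chars.startswith_iff _ _).mp h
        simp only [h, not_true_eq_false, if_false]
        rw [← hr, ← List.append_assoc, ih]
        congr 1
        rw [PySem.List.slice_from _ (Int.natCast_nonneg _)]
        simp
      · simp only [h]
        apply rebB_of_not_prefix
        intro hp
        exact h ((PySem.Chars.startswith_iff _ _).mpr
          ((List.prefix_append_right_inj t).mp hp))

lemma foldl_or_eq_any {α : Type} (p : α → Bool) :
    ∀ (l : List α) (acc : Bool), l.foldl (fun a x => a || p x) acc = (acc || l.any p) := by
  intro l
  induction l with
  | nil => simp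
  | cons x xs ih => intro acc; simp [List.foldl, ih, Bool.or_assoc]

lemma roaringA_eq_roaringB (y : Int) : roaringA y = roaringB y := by
  unfold roaringA roaringB
  rw [foldl_or_eq_any]
  simp only [Bool.false_or]
  apply PySem.List.any_congr_mem
  intro k hk
  have hk0 : 0 ≤ k := by
    have := PySem.List.mem_pyRange_one.mp hk
    omega
  simp only [PySem.List.slice_to _ hk0, PySem.List.slice_from _ hk0]
  have h2 := rebB_eq_okA (PySem.Int.toChars y).length
    (List.take k.toNat (PySem.Int.toChars y)) (List.take k.toNat (PySem.Int.toChars y))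
    (List.drop k.toNat (PySem.Int.toChars y))
  rw [List.take_append_drop] at h2
  exact h2.symm

lemma searchA_eq_loopB (Y n : Int) : ∀ (fuel : Nat) (a b : Int), a < b →
    searchA Y n fuel a b
      = (buildB (loopB Y n fuel a b).1 n, buildB (loopB Y n fuel a b).2 n) := by
  intro fuel
  induction fuel with
  | zero => intro a b _; simp [searchA, loopB, buildA_eq_buildB]
  | succ fuel ih =>
    intro a b hab
    by_cases h1 : a + 1 = b
    · have h2 : ¬ (a + 1 < b) := by omega
      simp [searchA, loopB, h1, buildA_eq_buildB]
    · have h2 : a + 1 < b := by omega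
      have hmid1 : a < PySem.Int.floordiv (a + b) 2 := by
        have := (PySem.Int.le_floordiv_iff_mul_le (a := a + b) (b := 2) (q := a + 1)
          (by norm_num)).mpr (by omega)
        omega
      have hmid2 : PySem.Int.floordiv (a + b) 2 < b := by
        exact (PySem.Int.floordiv_lt_iff_lt_mul (a := a + b) (b := 2) (q := b)
          (by norm_num)).mpr (by omega)
      simp only [searchA, loopB, if_neg h1, if_pos h2, buildA_eq_buildB]
      by_cases hb : buildB (PySem.Int.floordiv (a + b) 2) n > Y
      · simp only [if_pos hb]; exact ih a _ hmid1
      · simp only [if_neg hb]; exact ih _ b hmid2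

-- A's running-best fold over a candidate list is min over the accepted candidates
lemma foldl_best_eq_min (p : Int → Bool) :
    ∀ (l : List Int) (init : Int),
      l.foldl (fun best k => if p k && decide (k < best) then k else best) init
        = (l.filter p).foldl min init := by
  intro l
  induction l with
  | nil => intro init; rfl
  | cons x xs ih =>
    intro init
    rw [List.foldl_cons, List.filter_cons]
    by_cases hp : p x = true
    · have hstep : (if (p x && decide (x < init)) = true then x else init) = min init x := by
        by_cases hx : x < init
        · simp only [hp, Bool.true_and, decide_eq_true_eq, if_pos hx]; omega
        · simp only [hp, Bool.true_and, decide_eq_true_eq, if_neg hx]; omega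
      rw [hstep, if_pos hp, List.foldl_cons, ih]
    · have hstep : (if (p x && decide (x < init)) = true then x else init) = init := by
        simp [hp]
      rw [hstep, if_neg hp, ih]

-- A's fold over n with an inner fold over the two candidates is one fold over the flattened candidates
lemma foldl_foldl_eq_flatMap {α β : Type} (g : β → List α) (f : Int → α → Int) :
    ∀ (l : List β) (init : Int),
      l.foldl (fun best n => (g n).foldl f best) init = (l.flatMap g).foldl f init := by
  intro l
  induction l with
  | nil => intro init; rfl
  | cons x xs ih => intro init; simp [List.foldl, ih, List.foldl_append]

-- ===== VERDICT (by name: the statement is the Claim_ definition above) =====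
theorem next_roaring_spec : Claim_equal_next_roaring := by
  intro Y _
  unfold Spec_next_roaring next_roaring next_roaring_alt
  by_cases hY : Y < 10
  · simp [hY]
  · simp only [if_neg hY]
    rw [PySem.List.foldl_append_eq_flatMap
      (g := fun n => let p := loopB Y n 64 1 (10 ^ 10); [buildB p.1 n, buildB p.2 n])]
    rw [PySem.List.min?_id_cons, Option.getD_some]
    rw [← foldl_best_eq_min, List.nil_append]
    rw [← foldl_foldl_eq_flatMap]
    apply PySem.List.foldl_congr_mem
    intro best n _
    rw [searchA_eq_loopB Y n 64 1 (10 ^ 10) (by norm_num)]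
    simp only [List.foldl_cons, List.foldl_nil]
    have hc : ∀ (b k : Int),
        (roaringA k && decide (k > Y) && decide (k < b))
          = ((decide (k > Y) && roaringB k) && decide (k < b)) := by
      intro b k
      rw [roaringA_eq_roaringB]
      cases roaringB k <;> simp
    rw [hc, hc]
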